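-- pv_equiv track=rewrite | github.com/Mercerenies/eulers-melting-pot | etc/problem116.py | f
-- ===== SOURCE A (Python) =====
-- def f(n, c):
--     gray = [0 for _ in range(n+1)]
--     col  = [0 for _ in range(n+1)]
--
--     gray[0] = 1
--     col[0] = 1
--
--     for i in range(1, n+1):
--         g = col[i - c] if i - c >= 0 else 0
--         gray[i] = g
--
--         r = 0
--         for j in range(i):
--             r += gray[j]
--         col[i] = r + g
--
--     return col[n] - 1
-- ===== SOURCE B (Python) =====
-- def f(n, c):
--     # Direct linear recurrence col[i] = col[i-1] + col[i-c] (the i-c term only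
--     # when it points at an already computed entry), appending to one growing
--     # list: no gray array and no inner summation.
--     cols = [1]
--     for i in range(1, n + 1):
--         g = cols[i - c] if 0 <= i - c < i else 0
--         cols.append(cols[i - 1] + g)
--     return cols[n] - 1
-- ===== Notes on version B (the rewrite author's own statement) =====
-- stated objective: faster
-- what changed: B uses the direct linear recurrence col[i] = col[i-1] + col[i-c], appending to a single growing list, instead of A's gray array with an inner re-summation pass at every step.
import Mathlib
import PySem

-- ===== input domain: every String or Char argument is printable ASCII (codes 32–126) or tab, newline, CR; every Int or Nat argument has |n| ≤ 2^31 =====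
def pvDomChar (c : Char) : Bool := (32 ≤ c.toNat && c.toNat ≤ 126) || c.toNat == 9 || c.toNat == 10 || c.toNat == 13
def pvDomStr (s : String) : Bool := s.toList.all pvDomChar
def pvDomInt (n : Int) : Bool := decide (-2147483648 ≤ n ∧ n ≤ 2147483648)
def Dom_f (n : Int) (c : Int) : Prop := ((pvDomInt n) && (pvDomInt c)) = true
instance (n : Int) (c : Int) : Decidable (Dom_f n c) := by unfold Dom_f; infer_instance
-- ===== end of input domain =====

-- B replaces A's gray array and inner re-summation by the direct linear recurrence
-- col[i] = col[i-1] + col[i-c], appending to one growing list (faster).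

-- ===== PORT A =====
-- inner loop: r = 0; for j in range(i): r += gray[j]
def innerSumA (gray : List Int) (i : Int) : Int :=
  (PySem.List.pyRange 0 i 1).foldl (fun r j => r + PySem.List.pyGetD gray j 0) 0

-- one iteration of A's outer loop (state = (gray, col)); indices are in range under Pre_f
def stepA (c : Int) (st : List Int × List Int) (i : Int) : List Int × List Int :=
  let g := if i - c ≥ 0 then PySem.List.pyGetD st.2 (i - c) 0 else 0
  let gray := st.1.set i.toNat g
  let col := st.2.set i.toNat (innerSumA gray i + g)
  (gray, col)

def f (n : Int) (c : Int) : Int :=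
  let gray := (List.replicate (n + 1).toNat 0).set 0 1
  let col := (List.replicate (n + 1).toNat 0).set 0 1
  let st := (PySem.List.pyRange 1 (n + 1) 1).foldl (stepA c) (gray, col)
  PySem.List.pyGetD st.2 n 0 - 1

-- ===== PORT B =====
-- cols after the first k iterations of B's loop: cols = [1], then appending
-- cols[i-1] + (cols[i-c] if the index points at an already computed entry else 0)
def colsB (c : Int) : Nat → List Int
  | 0 => [1]
  | k + 1 =>
    let l := colsB c k
    let i : Int := (k : Int) + 1
    let g := if 0 ≤ i - c ∧ i - c < i then PySem.List.pyGetD l (i - c) 0 else 0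
    l ++ [PySem.List.pyGetD l (i - 1) 0 + g]

def f_alt (n : Int) (c : Int) : Int :=
  PySem.List.pyGetD (colsB c n.toNat) n 0 - 1

-- ===== PRECONDITION & SPEC =====
-- Pre_f excludes exactly the inputs where Python A raises an IndexError:
-- n < 0 (empty arrays, gray[0] = 1 fails) and c < 0 with n ≥ 1 (col[i - c] out of range).
def Pre_f (n : Int) (c : Int) : Prop := 0 ≤ n ∧ (0 ≤ c ∨ n = 0)
instance (n : Int) (c : Int) : Decidable (Pre_f n c) := by unfold Pre_f; infer_instance
def pvWitness_f : Int × Int := (6, 3)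
def Spec_f (n : Int) (c : Int) (out : Int) : Prop := out = f_alt n c
instance (n : Int) (c : Int) (out : Int) : Decidable (Spec_f n c out) := by unfold Spec_f; infer_instance

-- ===== CLAIM (what is proved, stated in full; the proofs are below) =====
def Claim_equal_f : Prop := ∀ (n : Int) (c : Int), Dom_f n c → Pre_f n c → Spec_f n c (f n c)

-- ===== LEMMAS AND PROOFS =====

-- the sum of the first k entries of gray, in Nat form
def sumTo (gray : List Int) (k : Nat) : Int :=
  (List.range k).foldl (fun r j => r + gray.getD j 0) 0

theorem innerSumA_eq_sumTo (gray : List Int) (k : Nat) :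
    innerSumA gray (k : Int) = sumTo gray k := by
  unfold innerSumA sumTo
  induction k with
  | zero =>
    rw [PySem.List.pyRange_one_eq_nil (by omega)]
    simp
  | succ m ih =>
    rw [show ((m + 1 : Nat) : Int) = (m : Int) + 1 by push_cast; ring,
        PySem.List.pyRange_one_succ_right (by omega), List.range_succ,
        List.foldl_append, List.foldl_append, ih]
    simp [PySem.List.pyGetD_natCast]

theorem sumTo_succ (gray : List Int) (k : Nat) :
    sumTo gray (k + 1) = sumTo gray k + gray.getD k 0 := by
  unfold sumTo
  rw [List.range_succ, List.foldl_append]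
  simp

theorem sumTo_set_ge (gray : List Int) (k m : Nat) (g : Int) (h : k ≤ m) :
    sumTo (gray.set m g) k = sumTo gray k := by
  induction k with
  | zero => simp [sumTo]
  | succ j ih =>
    rw [sumTo_succ, sumTo_succ, ih (by omega)]
    have : (gray.set m g).getD j 0 = gray.getD j 0 := by
      unfold List.getD
      rw [List.getElem?_set_ne (by omega)]
    rw [this]

theorem getD_append_singleton (l : List Int) (x : Int) (j : Nat) :
    (l ++ [x]).getD j 0 = if j = l.length then x else l.getD j 0 := by
  unfold List.getD
  rcases lt_trichotomy j l.length with h | h | h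
  · rw [List.getElem?_append_left h, if_neg (by omega)]
  · subst h
    simp
  · rw [if_neg (by omega), List.getElem?_eq_none (by simp; omega),
        List.getElem?_eq_none (by omega)]

theorem init_getD (len : Nat) (hlen : 1 ≤ len) (j : Nat) :
    ((List.replicate len (0 : Int)).set 0 1).getD j 0 = if j = 0 then 1 else 0 := by
  unfold List.getD
  rcases Nat.eq_zero_or_pos j with h | h
  · subst h
    rw [List.getElem?_set_self (by simpa using hlen)]
    simp
  · rw [if_neg (by omega), List.getElem?_set_ne (by omega)]
    rcases Nat.lt_or_ge j len with h2 | h2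
    · simp [h2]
    · rw [List.getElem?_eq_none (by simpa using h2)]
      rfl

theorem length_colsB (c : Int) (m : Nat) : (colsB c m).length = m + 1 := by
  induction m with
  | zero => rfl
  | succ k ih => simp [colsB, ih]

theorem colsB_getD_of_gt (c : Int) (m j : Nat) (h : m < j) :
    (colsB c m).getD j 0 = 0 := by
  unfold List.getD
  rw [List.getElem?_eq_none (by rw [length_colsB]; omega)]
  rfl

-- loop invariant: after m iterations A's col agrees (as a total getD-function)
-- with B's cols, the running gray-sum equals cols[m], and lengths are preserved
theorem loop_inv (n c : Int) (hn : 0 ≤ n) (hc : 0 ≤ c) (m : Nat) (hm : (m : Int) ≤ n) :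
    let init := (List.replicate (n + 1).toNat 0).set 0 1
    let stA := (PySem.List.pyRange 1 ((m : Int) + 1) 1).foldl (stepA c) (init, init)
    (∀ j : Nat, stA.2.getD j 0 = (colsB c m).getD j 0) ∧
      sumTo stA.1 (m + 1) = (colsB c m).getD m 0 ∧
      stA.1.length = (n + 1).toNat ∧ stA.2.length = (n + 1).toNat := by
  intro init
  induction m with
  | zero =>
    simp only [Nat.cast_zero, zero_add,
      PySem.List.pyRange_one_eq_nil (by omega : (1:Int) ≤ 1), List.foldl_nil]
    have hinit : ∀ j : Nat, init.getD j 0 = if j = 0 then 1 else 0 := fun j =>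
      init_getD (n + 1).toNat (by omega) j
    refine ⟨?_, ?_, by simp [init], by simp [init]⟩
    · intro j
      rw [hinit j]
      show _ = ([1] : List Int).getD j 0
      rcases Nat.eq_zero_or_pos j with h | h
      · subst h; rfl
      · rw [if_neg (by omega)]
        unfold List.getD
        rw [List.getElem?_eq_none (by simp; omega)]
        rfl
    · rw [sumTo_succ, hinit 0]
      simp [sumTo, colsB]
  | succ m ih =>
    have hm' : (m : Int) ≤ n := by push_cast at hm ⊢; omega
    obtain ⟨hcol, hpre, hlg, hlc⟩ := ih hm'
    rw [show (((m + 1 : Nat) : Int) + 1) = ((m : Int) + 1 + 1) by push_cast; ring,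
        PySem.List.pyRange_one_succ_right (by omega)]
    simp only [List.foldl_append, List.foldl_cons, List.foldl_nil]
    set stA := (PySem.List.pyRange 1 ((m : Int) + 1) 1).foldl (stepA c) (init, init) with hA
    set L := colsB c m with hL
    have hLlen : L.length = m + 1 := length_colsB c m
    -- B's next list
    have hcolsB : colsB c (m + 1)
        = L ++ [PySem.List.pyGetD L ((m : Int) + 1 - 1) 0 +
            (if 0 ≤ (m : Int) + 1 - c ∧ (m : Int) + 1 - c < (m : Int) + 1
             then PySem.List.pyGetD L ((m : Int) + 1 - c) 0 else 0)] := by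
      simp only [colsB]
      rfl
    -- the guarded reads g agree
    have hgetD_nonneg : ∀ (l : List Int) (t : Int), 0 ≤ t →
        PySem.List.pyGetD l t 0 = l.getD t.toNat 0 := by
      intro l t ht
      rw [show t = ((t.toNat : Nat) : Int) by omega, PySem.List.pyGetD_natCast]
      rw [Int.toNat_natCast]
    have hg : (if ((m : Int) + 1) - c ≥ 0 then PySem.List.pyGetD stA.2 (((m : Int) + 1) - c) 0 else 0)
        = (if 0 ≤ (m : Int) + 1 - c ∧ (m : Int) + 1 - c < (m : Int) + 1
           then PySem.List.pyGetD L ((m : Int) + 1 - c) 0 else 0) := by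
      by_cases h1 : 0 ≤ (m : Int) + 1 - c
      · by_cases h2 : (m : Int) + 1 - c < (m : Int) + 1
        · rw [if_pos (by omega), if_pos ⟨h1, h2⟩, hgetD_nonneg _ _ h1, hgetD_nonneg _ _ h1,
              hcol]
        · -- c = 0: A reads the not-yet-assigned col[m+1] = 0, B takes 0
          have hc0 : c = 0 := by omega
          rw [if_pos (by omega), if_neg (by omega), hgetD_nonneg _ _ h1, hcol,
              colsB_getD_of_gt c m _ (by omega)]
      · rw [if_neg (by omega), if_neg (by omega)]
    set g := (if 0 ≤ (m : Int) + 1 - c ∧ (m : Int) + 1 - c < (m : Int) + 1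
              then PySem.List.pyGetD L ((m : Int) + 1 - c) 0 else 0) with hgdef
    have htoNat : ((m : Int) + 1).toNat = m + 1 := by omega
    have hmlt : m + 1 < (n + 1).toNat := by omega
    have hinner : innerSumA (stA.1.set ((m : Int) + 1).toNat g) ((m : Int) + 1)
        = sumTo stA.1 (m + 1) := by
      rw [htoNat, show ((m : Int) + 1) = ((m + 1 : Nat) : Int) by push_cast; ring,
          innerSumA_eq_sumTo, sumTo_set_ge _ _ _ _ (le_refl _)]
    have hlast : PySem.List.pyGetD L ((m : Int) + 1 - 1) 0 = L.getD m 0 := by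
      rw [show (m : Int) + 1 - 1 = ((m : Nat) : Int) by ring, PySem.List.pyGetD_natCast]
    have hstep : stepA c stA ((m : Int) + 1)
        = (stA.1.set ((m : Int) + 1).toNat g,
           stA.2.set ((m : Int) + 1).toNat
             (innerSumA (stA.1.set ((m : Int) + 1).toNat g) ((m : Int) + 1) + g)) := by
      simp only [stepA]
      rw [hg]
    rw [hstep]
    refine ⟨?_, ?_, ?_, ?_⟩
    · intro j
      show (stA.2.set _ (innerSumA _ ((m : Int) + 1) + _)).getD j 0 = _
      rw [hinner, hpre, hcolsB, getD_append_singleton, hLlen, htoNat, hlast]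
      by_cases hj : j = m + 1
      · subst hj
        rw [if_pos rfl]
        unfold List.getD
        rw [List.getElem?_set_self (by omega)]
        rfl
      · rw [if_neg hj]
        unfold List.getD
        rw [List.getElem?_set_ne (by omega)]
        exact hcol j
    · show sumTo (stA.1.set ((m : Int) + 1).toNat _) (m + 1 + 1) = _
      rw [htoNat, sumTo_succ, sumTo_set_ge _ _ _ _ (le_refl _), hpre,
          hcolsB, getD_append_singleton, hLlen, if_pos rfl, hlast]
      congr 1
      unfold List.getD
      rw [List.getElem?_set_self (by omega)]
      rfl
    · show (stA.1.set _ _).length = _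
      simpa using hlg
    · show (stA.2.set _ _).length = _
      simpa using hlc

-- ===== VERDICT (by name: the statement is the Claim_ definition above) =====
theorem f_spec : Claim_equal_f := by
  intro n c _ hpre
  show f n c = f_alt n c
  have hn : (0 : Int) ≤ n := hpre.1
  rcases hpre.2 with hc | hn0
  · obtain ⟨hcol, -, -, -⟩ := loop_inv n c hn hc n.toNat (by omega)
    simp only [show ((n.toNat : Int) + 1) = n + 1 by omega] at hcol
    simp only [f, f_alt]
    have hgd : ∀ (l : List Int), PySem.List.pyGetD l n 0 = l.getD n.toNat 0 := by
      intro l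
      rw [show n = ((n.toNat : Nat) : Int) by omega, PySem.List.pyGetD_natCast]
      rw [Int.toNat_natCast]
    rw [hgd, hgd, hcol]
  · subst hn0
    simp [f, f_alt, colsB, PySem.List.pyRange_one_eq_nil (le_refl (1 : Int)),
      PySem.List.pyGetD]
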